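-- pv_equiv track=rewrite | github.com/terrene-foundation/kailash-py | src/kailash/nodes/enterprise/audit_logger.py | _determine_data_classification
-- ===== SOURCE A (Python) =====
-- from typing import Any, Dict, List
--
-- def _determine_data_classification(actions: List[Dict]) -> str:
--     """Determine the highest data classification level accessed."""
--     classifications = []
--
--     for action in actions:
--         action_type = action.get("action", "")
--         if "patient" in action_type:
--             classifications.append("confidential")
--         elif "transaction" in action_type or "financial" in action_type:
--             classifications.append("restricted")
--         elif "analytics" in action_type:
--             classifications.append("internal")
--         else:
--             classifications.append("public")
--
--     # Return highest classification
--     if "confidential" in classifications: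
--         return "confidential"
--     elif "restricted" in classifications:
--         return "restricted"
--     elif "internal" in classifications:
--         return "internal"
--     else:
--         return "public"
-- ===== SOURCE B (Python) =====
-- from typing import Any, Dict, List
--
-- _LEVELS = ["public", "internal", "restricted", "confidential"]
--
-- def _classification_rank(action_type):
--     if "patient" in action_type:
--         return 3
--     if "transaction" in action_type or "financial" in action_type:
--         return 2
--     if "analytics" in action_type:
--         return 1
--     return 0
--
-- def _determine_data_classification(actions: List[Dict]) -> str:
--     best = 0
--     for action in actions:
--         best = max(best, _classification_rank(action.get("action", "")))
--     return _LEVELS[best]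
-- ===== Notes on version B (the rewrite author's own statement) =====
-- stated objective: simpler
-- what changed: B maps each action to a numeric rank (public<internal<restricted<confidential) and keeps a running maximum in one pass, indexing a level table at the end, instead of building a list of classification strings and rescanning it with three membership tests.
import Mathlib
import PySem

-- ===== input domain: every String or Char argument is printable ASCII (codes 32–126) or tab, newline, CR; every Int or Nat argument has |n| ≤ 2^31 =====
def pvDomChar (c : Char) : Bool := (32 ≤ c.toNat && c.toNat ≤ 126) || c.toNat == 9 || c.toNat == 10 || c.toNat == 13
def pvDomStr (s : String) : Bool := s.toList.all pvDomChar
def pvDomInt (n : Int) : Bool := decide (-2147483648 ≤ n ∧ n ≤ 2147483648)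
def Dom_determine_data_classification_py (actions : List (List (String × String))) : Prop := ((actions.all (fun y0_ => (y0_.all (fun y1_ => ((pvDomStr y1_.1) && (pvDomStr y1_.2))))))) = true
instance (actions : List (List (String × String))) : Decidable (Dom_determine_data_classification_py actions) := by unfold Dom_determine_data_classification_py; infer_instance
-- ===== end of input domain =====

-- B replaces A's list-of-strings + rescan with a one-pass running maximum over numeric ranks (objective: simpler).


-- ===== PORT A =====
def determine_data_classification_py (actions : List (List (String × String))) : String :=
  let classifications : List String :=
    actions.foldl (fun classifications action =>
      let action_type := PySem.Dict.getD (PySem.Dict.mk action) "action" ""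
      if PySem.Str.isIn "patient" action_type then
        classifications ++ ["confidential"]
      else if PySem.Str.isIn "transaction" action_type || PySem.Str.isIn "financial" action_type then
        classifications ++ ["restricted"]
      else if PySem.Str.isIn "analytics" action_type then
        classifications ++ ["internal"]
      else
        classifications ++ ["public"]) []
  if "confidential" ∈ classifications then "confidential"
  else if "restricted" ∈ classifications then "restricted"
  else if "internal" ∈ classifications then "internal"
  else "public"

-- ===== PORT B =====
def pvLevels : List String := ["public", "internal", "restricted", "confidential"]

def pvClassificationRank (action_type : String) : Nat :=
  if PySem.Str.isIn "patient" action_type then 3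
  else if PySem.Str.isIn "transaction" action_type || PySem.Str.isIn "financial" action_type then 2
  else if PySem.Str.isIn "analytics" action_type then 1
  else 0

def determine_data_classification_py_alt (actions : List (List (String × String))) : String :=
  let best := actions.foldl (fun best action =>
    max best (pvClassificationRank (PySem.Dict.getD (PySem.Dict.mk action) "action" ""))) 0
  pvLevels.getD best "public"

-- ===== PRECONDITION & SPEC =====
def Spec_determine_data_classification_py (actions : List (List (String × String))) (out : String) : Prop := out = determine_data_classification_py_alt actions
instance (actions : List (List (String × String))) (out : String) : Decidable (Spec_determine_data_classification_py actions out) := by unfold Spec_determine_data_classification_py; infer_instance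

-- ===== CLAIM (what is proved, stated in full; the proofs are below) =====
def Claim_equal_determine_data_classification_py : Prop := ∀ (actions : List (List (String × String))), Dom_determine_data_classification_py actions → Spec_determine_data_classification_py actions (determine_data_classification_py actions)

-- ===== LEMMAS AND PROOFS =====

-- proof-side helpers
def pvName (r : Nat) : String := pvLevels.getD r "public"
def pvRankOf (action : List (String × String)) : Nat :=
  pvClassificationRank (PySem.Dict.getD (PySem.Dict.mk action) "action" "")
def pvM (rs : List Nat) : Nat := rs.foldl max 0

lemma pvRank_le_3 (action : List (String × String)) : pvRankOf action ≤ 3 := by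
  unfold pvRankOf pvClassificationRank; split_ifs <;> omega

lemma cls_step (action : List (String × String)) (acc : List String) :
    (if PySem.Str.isIn "patient" (PySem.Dict.getD (PySem.Dict.mk action) "action" "") then acc ++ ["confidential"]
     else if PySem.Str.isIn "transaction" (PySem.Dict.getD (PySem.Dict.mk action) "action" "") || PySem.Str.isIn "financial" (PySem.Dict.getD (PySem.Dict.mk action) "action" "") then acc ++ ["restricted"]
     else if PySem.Str.isIn "analytics" (PySem.Dict.getD (PySem.Dict.mk action) "action" "") then acc ++ ["internal"]
     else acc ++ ["public"]) = acc ++ [pvName (pvRankOf action)] := by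
  unfold pvRankOf pvClassificationRank pvName pvLevels
  split_ifs <;> rfl

lemma foldA_eq :
    ∀ (actions : List (List (String × String))) (acc : List String),
      actions.foldl (fun classifications action =>
        if PySem.Str.isIn "patient" (PySem.Dict.getD (PySem.Dict.mk action) "action" "") then classifications ++ ["confidential"]
        else if PySem.Str.isIn "transaction" (PySem.Dict.getD (PySem.Dict.mk action) "action" "") || PySem.Str.isIn "financial" (PySem.Dict.getD (PySem.Dict.mk action) "action" "") then classifications ++ ["restricted"]
        else if PySem.Str.isIn "analytics" (PySem.Dict.getD (PySem.Dict.mk action) "action" "") then classifications ++ ["internal"]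
        else classifications ++ ["public"]) acc
      = acc ++ actions.map (fun a => pvName (pvRankOf a)) := by
  intro actions
  induction actions with
  | nil => intro acc; simp
  | cons a as ih =>
      intro acc
      simp only [List.foldl_cons, List.map_cons]
      rw [cls_step a acc, ih]
      simp

lemma foldl_max_acc (rs : List Nat) : ∀ b, rs.foldl max b = max b (pvM rs) := by
  induction rs with
  | nil => intro b; simp [pvM]
  | cons r rs ih =>
      intro b
      simp only [pvM, List.foldl_cons] at *
      rw [ih, ih (max 0 r)]
      omega

lemma mem_le_M (rs : List Nat) (x : Nat) (hx : x ∈ rs) : x ≤ pvM rs := by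
  induction rs with
  | nil => cases hx
  | cons r rs ih =>
      have h := foldl_max_acc rs
      cases hx with
      | head => simp only [pvM, List.foldl_cons]; rw [h]; omega
      | tail _ hx' =>
          have := ih hx'
          simp only [pvM, List.foldl_cons]; rw [h]; omega

lemma M_mem_or_zero (rs : List Nat) : pvM rs = 0 ∨ pvM rs ∈ rs := by
  induction rs with
  | nil => left; rfl
  | cons r rs ih =>
      have h := foldl_max_acc rs
      have hM : pvM (r :: rs) = max r (pvM rs) := by
        simp only [pvM, List.foldl_cons]; rw [h, Nat.zero_max]; rfl
      rcases ih with h0 | hmem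
      · rcases Nat.eq_zero_or_pos r with hr | hr
        · left; omega
        · right; rw [hM]
          have : max r (pvM rs) = r := by omega
          rw [this]; exact List.mem_cons_self
      · rcases le_total r (pvM rs) with hle | hle
        · right; rw [hM, max_eq_right hle]; exact List.mem_cons_of_mem _ hmem
        · right; rw [hM, max_eq_left hle]; exact List.mem_cons_self

lemma aux_eq (rs : List Nat) (h : ∀ x ∈ rs, x ≤ 3) :
    (if (3 : Nat) ∈ rs then "confidential"
     else if (2 : Nat) ∈ rs then "restricted"
     else if (1 : Nat) ∈ rs then "internal"
     else "public") = pvName (pvM rs) := by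
  have hle : pvM rs ≤ 3 := by
    rcases M_mem_or_zero rs with h0 | hm
    · omega
    · exact h _ hm
  have hmo := M_mem_or_zero rs
  have hmem3 := mem_le_M rs 3
  have hmem2 := mem_le_M rs 2
  have hmem1 := mem_le_M rs 1
  set m := pvM rs with hm
  interval_cases m
  · have h3 : (3:Nat) ∉ rs := fun hx => by have := hmem3 hx; omega
    have h2 : (2:Nat) ∉ rs := fun hx => by have := hmem2 hx; omega
    have h1 : (1:Nat) ∉ rs := fun hx => by have := hmem1 hx; omega
    simp [h1, h2, h3, pvName, pvLevels]
  · have h3 : (3:Nat) ∉ rs := fun hx => by have := hmem3 hx; omega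
    have h2 : (2:Nat) ∉ rs := fun hx => by have := hmem2 hx; omega
    have h1 : (1:Nat) ∈ rs := by
      rcases hmo with h0 | hmem
      · omega
      · exact hmem
    simp [h1, h2, h3, pvName, pvLevels]
  · have h3 : (3:Nat) ∉ rs := fun hx => by have := hmem3 hx; omega
    have h2 : (2:Nat) ∈ rs := by
      rcases hmo with h0 | hmem
      · omega
      · exact hmem
    simp [h2, h3, pvName, pvLevels]
  · have h3 : (3:Nat) ∈ rs := by
      rcases hmo with h0 | hmem
      · omega
      · exact hmem
    simp [h3, pvName, pvLevels]

lemma name_mem_iff (rs : List Nat) (h : ∀ x ∈ rs, x ≤ 3) (k : Nat) (hk : k ≤ 3) :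
    (pvName k ∈ rs.map pvName) ↔ k ∈ rs := by
  constructor
  · intro hmem
    rcases List.mem_map.mp hmem with ⟨x, hx, hnx⟩
    have hx3 := h x hx
    have : x = k := by
      interval_cases x <;> interval_cases k <;> first | rfl | (exfalso; revert hnx; decide)
    rwa [this] at hx
  · intro hmem; exact List.mem_map.mpr ⟨k, hmem, rfl⟩

-- ===== VERDICT (by name: the statement is the Claim_ definition above) =====
theorem determine_data_classification_py_spec : Claim_equal_determine_data_classification_py := by
  intro actions _
  unfold Spec_determine_data_classification_py determine_data_classification_py determine_data_classification_py_alt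
  dsimp only
  rw [foldA_eq actions []]
  simp only [List.nil_append]
  have hmap : actions.map (fun a => pvName (pvRankOf a)) = (actions.map pvRankOf).map pvName := by
    rw [List.map_map]; rfl
  rw [hmap]
  set rs := actions.map pvRankOf with hrs
  have hb : ∀ x ∈ rs, x ≤ 3 := by
    intro x hx
    rcases List.mem_map.mp hx with ⟨a, _, rfl⟩
    exact pvRank_le_3 a
  have hfold : actions.foldl (fun best action =>
      max best (pvClassificationRank (PySem.Dict.getD (PySem.Dict.mk action) "action" ""))) 0 = pvM rs := by
    rw [hrs, pvM, List.foldl_map]; rfl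
  rw [hfold]
  have h3 : ("confidential" ∈ rs.map pvName) ↔ (3:Nat) ∈ rs := name_mem_iff rs hb 3 (by omega)
  have h2 : ("restricted" ∈ rs.map pvName) ↔ (2:Nat) ∈ rs := name_mem_iff rs hb 2 (by omega)
  have h1 : ("internal" ∈ rs.map pvName) ↔ (1:Nat) ∈ rs := name_mem_iff rs hb 1 (by omega)
  have hname : pvLevels.getD (pvM rs) "public" = pvName (pvM rs) := rfl
  rw [hname, ← aux_eq rs hb]
  simp only [h1, h2, h3]
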